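-- pv_equiv track=rewrite | github.com/zby152/study_data | 大三上/密码学/实验/2/源码/MATH.py | mod_x
-- ===== SOURCE A (Python) =====
-- def mod_x(byte):
--     """二进制多项式与不可约多项式的模除"""
--     # 不可约多项式
--     divisor = [1, 0, 0, 0, 1, 1, 0, 1, 1]
--     divisor_length = len(divisor)
--
--     # 被除数
--     bits = bin(int(byte, 16))[2:]
--     bits = [int(bit) for bit in bits]
--     bits_length = len(bits)
--
--     # 只要被除数位数大于不可约多项式则循环
--     while bits_length >= divisor_length:
--         coefficient = bits[0]
--
--         # 对被除数的高位开始每一位与不可约多项式异或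
--         for i in range(divisor_length):
--             bits[i] ^= (divisor[i] & coefficient)
--
--         # 清除高位的0
--         while bits_length > 0 and bits[0] == 0:
--             bits.pop(0)
--             bits_length -= 1
--
--     result = ''
--     for bit in bits:
--         result += str(bit)
--     if len(result) == 0:
--         result = '0'
--     num = int(result, 2)
--     # 将整数转换为十六进制字符串并返回（去掉前缀'0x'）
--     return hex(num)[2:]
-- ===== SOURCE B (Python) =====
-- def mod_x(byte):
--     """GF(2) reduction mod x^8+x^4+x^3+x+1, Horner-style single MSB->LSB pass
--     keeping only an 8-bit accumulator (CRC-style), instead of repeatedly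
--     XOR-ing the divisor at the top set bit of the full-width number."""
--     n = int(byte, 16)
--     r = 0
--     for k in range(n.bit_length() - 1, -1, -1):
--         r <<= 1
--         if r & 0x100:
--             r ^= 0x11B
--         r ^= (n >> k) & 1
--     return hex(r)[2:]
-- ===== Notes on version B (the rewrite author's own statement) =====
-- stated objective: faster
-- what changed: replaces A's repeated top-down divisor elimination (build a 0/1 list from the binary string, XOR a 9-entry divisor list at the current top set bit and pop leading zeros, round after round, then re-parse through a string) with a single Horner-style MSB-to-LSB pass over the bits that keeps only an 8-bit CRC-style accumulator (shift, conditional fold-back of the overflow bit, absorb the next bit)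
import Mathlib
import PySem

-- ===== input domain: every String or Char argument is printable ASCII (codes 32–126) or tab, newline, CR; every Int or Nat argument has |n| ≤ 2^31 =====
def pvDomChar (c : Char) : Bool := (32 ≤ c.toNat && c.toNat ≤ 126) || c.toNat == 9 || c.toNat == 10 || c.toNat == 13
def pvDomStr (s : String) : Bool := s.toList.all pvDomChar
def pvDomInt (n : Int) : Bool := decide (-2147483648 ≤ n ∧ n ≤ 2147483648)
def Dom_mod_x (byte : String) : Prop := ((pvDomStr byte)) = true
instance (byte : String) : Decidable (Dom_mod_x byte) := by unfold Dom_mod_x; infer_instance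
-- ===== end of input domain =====

-- B replaces A's round-by-round divisor elimination on a per-bit list (elementwise XOR at the
-- top set bit, pop(0) of leading zeros, re-parse through a string) by ONE Horner-style
-- MSB-to-LSB pass over the bits that keeps only an 8-bit CRC-style accumulator (objective: faster).

-- ===== PORT A =====
-- divisor = [1, 0, 0, 0, 1, 1, 0, 1, 1]
def pvDivisor : List Int := [1, 0, 0, 0, 1, 1, 0, 1, 1]

-- inner 'while bits_length > 0 and bits[0] == 0: bits.pop(0)'
def pvStripA : List Int → List Int
  | [] => []
  | b :: rest => if b = 0 then pvStripA rest else b :: rest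

-- 'for i in range(divisor_length): bits[i] ^= (divisor[i] & coefficient)' with coefficient = bits[0]
def pvXorStep (bits : List Int) : List Int :=
  let coefficient := PySem.List.pyGetD bits 0 0
  (PySem.List.pyRange 0 9 1).foldl
    (fun bs i => PySem.List.pySetD bs i
      (PySem.Int.bxor (PySem.List.pyGetD bs i 0)
        (PySem.Int.band (PySem.List.pyGetD pvDivisor i 0) coefficient))) bits

-- outer 'while bits_length >= divisor_length' (bits_length is always len(bits));
-- fuel only makes the recursion total: each executed round pops at least one leading bit,
-- so fuel = initial length is enough.
def pvLoopA : Nat → List Int → List Int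
  | 0, bits => bits
  | fuel+1, bits =>
    if 9 ≤ bits.length then pvLoopA fuel (pvStripA (pvXorStep bits)) else bits

def mod_x (byte : String) : String :=
  -- int(byte, 16); Pre_ guarantees some value
  let n : Int := (PySem.Int.ofStrBase? byte 16).getD 0
  -- bits = bin(...)[2:]
  let bitChars := PySem.List.slice (PySem.Int.toBinChars0b n) (some 2) none
  -- bits = [int(bit) for bit in bits]; under Pre_ (0 ≤ n) every char is a digit, never a ValueError
  let bits : List Int := bitChars.map (fun c => (PySem.Int.ofChars? [c]).getD 0)
  let bits := pvLoopA bits.length bits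
  -- result = ''; for bit in bits: result += str(bit)
  let result : List Char := bits.foldl (fun s b => s ++ PySem.Int.toChars b) []
  let result := if result.length = 0 then ['0'] else result
  -- num = int(result, 2); digits are '0'/'1', never a ValueError
  let num : Int := (PySem.Int.ofCharsBase? result 2).getD 0
  -- hex(num)[2:] (num ≥ 0)
  String.ofList (Nat.toDigits 16 num.toNat)

-- ===== PORT B =====
-- loop body: 'r <<= 1; if r & 0x100: r ^= 0x11B; r ^= (n >> k) & 1'
-- (every k produced by the range is ≥ 0, so Python's 'n >> k' is exactly 'n >>> k.toNat')
def pvStepB (n : Int) (r k : Int) : Int :=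
  let r := r <<< (1 : Nat)
  let r := if PySem.Int.band r 256 ≠ 0 then PySem.Int.bxor r 283 else r
  PySem.Int.bxor r (PySem.Int.band (n >>> k.toNat) 1)

def mod_x_alt (byte : String) : String :=
  -- int(byte, 16); Pre_ guarantees some value
  let n : Int := (PySem.Int.ofStrBase? byte 16).getD 0
  -- for k in range(n.bit_length() - 1, -1, -1): ...
  let r : Int := (PySem.List.pyRange ((PySem.Int.bitLength n : Int) - 1) (-1) (-1)).foldl (pvStepB n) 0
  -- hex(r)[2:] (r ≥ 0 whenever n ≥ 0)
  String.ofList (Nat.toDigits 16 r.toNat)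

-- ===== PRECONDITION & SPEC =====
-- Pre_ excludes exactly the inputs where A raises: strings int(byte, 16) rejects
-- (ValueError) and those parsing to a negative value, where A's int(bit) hits the base
-- prefix letter of the sign-prefixed binary literal and raises ValueError.
def Pre_mod_x (byte : String) : Prop := 0 ≤ (PySem.Int.ofStrBase? byte 16).getD (-1)
instance (byte : String) : Decidable (Pre_mod_x byte) := by unfold Pre_mod_x; infer_instance

def pvWitness_mod_x : String := "ff"

def Spec_mod_x (byte : String) (out : String) : Prop := out = mod_x_alt byte
instance (byte : String) (out : String) : Decidable (Spec_mod_x byte out) := by unfold Spec_mod_x; infer_instance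

-- ===== CLAIM (what is proved, stated in full; the proofs are below) =====
def Claim_equal_mod_x : Prop := ∀ (byte : String), Dom_mod_x byte → Pre_mod_x byte → Spec_mod_x byte (mod_x byte)

-- ===== LEMMAS AND PROOFS =====

-- ---- A-side machinery: the list loop computes an integer top-down reduction ----

-- value of an MSB-first 0/1 list
def pvVal (bits : List Int) : Nat := bits.foldl (fun a b => 2 * a + b.toNat) 0

-- proof-side mirror of A's outer loop on a single integer (same fuel discipline)
def pvLoopB : Nat → Int → Int
  | 0, n => n
  | fuel+1, n =>
    if 9 ≤ PySem.Int.bitLength n then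
      pvLoopB fuel (PySem.Int.bxor n ((283 : Int) <<< (PySem.Int.bitLength n - 9)))
    else n

-- canonical MSB-first binary digits (empty for 0); structural fuel keeps it kernel-reducible
def pvDigitsF : Nat → Nat → List Int
  | 0, _ => []
  | f+1, m => if m = 0 then [] else pvDigitsF f (m / 2) ++ [((m % 2 : Nat) : Int)]

def pvDigits (m : Nat) : List Int := pvDigitsF m m

def pvAll01 (bits : List Int) : Prop := ∀ b ∈ bits, b = 0 ∨ b = 1

theorem pvVal_go (bits : List Int) : ∀ a : Nat,
    bits.foldl (fun a b => 2 * a + b.toNat) a = a * 2 ^ bits.length + pvVal bits := by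
  induction bits with
  | nil => intro a; simp [pvVal]
  | cons b rest ih =>
      intro a
      simp only [List.foldl_cons, pvVal, List.length_cons]
      rw [ih, ih (2 * 0 + b.toNat)]
      ring

theorem pvVal_append (xs ys : List Int) :
    pvVal (xs ++ ys) = pvVal xs * 2 ^ ys.length + pvVal ys := by
  simp only [pvVal, List.foldl_append]
  rw [pvVal_go ys]
  rfl

theorem pvVal_cons_zero (xs : List Int) : pvVal ((0 : Int) :: xs) = pvVal xs := by
  simp only [pvVal, List.foldl_cons]
  norm_num

theorem pvVal_lt (bits : List Int) (h : pvAll01 bits) : pvVal bits < 2 ^ bits.length := by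
  induction bits with
  | nil => simp [pvVal]
  | cons b rest ih =>
      have hb : b = 0 ∨ b = 1 := h b (by simp)
      have hr := ih (fun x hx => h x (by simp [hx]))
      show pvVal (b :: rest) < 2 ^ (b :: rest).length
      simp only [pvVal, List.foldl_cons, List.length_cons]
      rw [pvVal_go]
      rcases hb with rfl | rfl <;> simp [pow_succ] <;> omega

theorem pvVal_ge (rest : List Int) : 2 ^ rest.length ≤ pvVal ((1 : Int) :: rest) := by
  simp only [pvVal, List.foldl_cons]
  rw [pvVal_go]
  norm_num

theorem pvVal_strip (xs : List Int) : pvVal (pvStripA xs) = pvVal xs := by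
  induction xs with
  | nil => rfl
  | cons b rest ih =>
      by_cases hb : b = 0
      · subst hb; rw [pvStripA, if_pos rfl, ih, pvVal_cons_zero]
      · rw [pvStripA, if_neg hb]

theorem pvStrip_all01 (xs : List Int) (h : pvAll01 xs) : pvAll01 (pvStripA xs) := by
  induction xs with
  | nil => exact h
  | cons b rest ih =>
      by_cases hb : b = 0
      · subst hb; rw [pvStripA, if_pos rfl]
        exact ih (fun x hx => h x (by simp [hx]))
      · rw [pvStripA, if_neg hb]; exact h

theorem pvStrip_head (xs : List Int) (h : pvAll01 xs) :
    pvStripA xs = [] ∨ (pvStripA xs).head? = some 1 := by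
  induction xs with
  | nil => exact Or.inl rfl
  | cons b rest ih =>
      by_cases hb : b = 0
      · subst hb; rw [pvStripA, if_pos rfl]
        exact ih (fun x hx => h x (by simp [hx]))
      · rw [pvStripA, if_neg hb]
        rcases h b (by simp) with h0 | h1
        · exact absurd h0 hb
        · subst h1; exact Or.inr rfl

theorem pvStrip_len (xs : List Int) : (pvStripA xs).length ≤ xs.length := by
  induction xs with
  | nil => simp [pvStripA]
  | cons b rest ih =>
      by_cases hb : b = 0
      · rw [pvStripA, if_pos hb]
        exact le_trans ih (by simp)
      · rw [pvStripA, if_neg hb]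

theorem pvStrip_len_zero (xs : List Int) : (pvStripA ((0 : Int) :: xs)).length ≤ xs.length := by
  rw [pvStripA, if_pos rfl]
  exact pvStrip_len xs

-- Nat xor of a high part against a shifted constant leaves the low part alone
theorem pvXorSplit (a x c r : Nat) (hx : x < 2 ^ r) :
    (a * 2 ^ r + x) ^^^ (c <<< r) = (a ^^^ c) * 2 ^ r + x := by
  rw [Nat.shiftLeft_eq]
  apply Nat.eq_of_testBit_eq
  intro j
  have h1 : a * 2 ^ r + x = 2 ^ r * a + x := by ring_nf
  have h2 : c * 2 ^ r = 2 ^ r * c + 0 := by ring_nf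
  have h3 : (a ^^^ c) * 2 ^ r + x = 2 ^ r * (a ^^^ c) + x := by ring_nf
  rw [h1, h2, h3, Nat.testBit_xor,
    Nat.testBit_two_pow_mul_add a hx, Nat.testBit_two_pow_mul_add c (by positivity),
    Nat.testBit_two_pow_mul_add (a ^^^ c) hx]
  split_ifs <;> simp [Nat.testBit_xor]

-- evaluation of the inner for-loop on a 9-headed list (coefficient = 1)
theorem pvXorStep_eval (b1 b2 b3 b4 b5 b6 b7 b8 : Int) (rest : List Int) :
    pvXorStep (1::b1::b2::b3::b4::b5::b6::b7::b8::rest) =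
      0 :: b1 :: b2 :: b3 :: PySem.Int.bxor b4 1 :: PySem.Int.bxor b5 1 :: b6 ::
      PySem.Int.bxor b7 1 :: PySem.Int.bxor b8 1 :: rest := by
  rw [pvXorStep, show PySem.List.pyRange 0 9 1 = (List.range 9).map (fun k => ((k:Nat):Int)) from by decide]
  rw [List.foldl_map]
  simp only [List.range_succ, List.range_zero, List.nil_append, List.cons_append,
    List.foldl_cons, List.foldl_nil, PySem.List.pySetD_natCast, PySem.List.pyGetD_natCast,
    pvDivisor]
  simp [List.set, List.getD, show PySem.Int.band 0 1 = 0 from by decide]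

theorem pvStep_val (b1 b2 b3 b4 b5 b6 b7 b8 : Int) (rest : List Int)
    (h : pvAll01 (1::b1::b2::b3::b4::b5::b6::b7::b8::rest)) :
    pvVal (pvStripA (pvXorStep (1::b1::b2::b3::b4::b5::b6::b7::b8::rest))) =
      pvVal (1::b1::b2::b3::b4::b5::b6::b7::b8::rest) ^^^ (283 <<< rest.length) := by
  have h1 := h b1 (by simp); have h2 := h b2 (by simp); have h3 := h b3 (by simp)
  have h4 := h b4 (by simp); have h5 := h b5 (by simp); have h6 := h b6 (by simp)
  have h7 := h b7 (by simp); have h8 := h b8 (by simp)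
  rw [pvXorStep_eval, pvVal_strip]
  have hsplit1 : ((0:Int) :: b1 :: b2 :: b3 :: PySem.Int.bxor b4 1 :: PySem.Int.bxor b5 1 :: b6 ::
      PySem.Int.bxor b7 1 :: PySem.Int.bxor b8 1 :: rest) =
      ([0, b1, b2, b3, PySem.Int.bxor b4 1, PySem.Int.bxor b5 1, b6,
        PySem.Int.bxor b7 1, PySem.Int.bxor b8 1] : List Int) ++ rest := rfl
  have hsplit2 : ((1:Int)::b1::b2::b3::b4::b5::b6::b7::b8::rest) =
      ([1, b1, b2, b3, b4, b5, b6, b7, b8] : List Int) ++ rest := rfl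
  rw [hsplit1, hsplit2, pvVal_append, pvVal_append]
  have hrest : pvVal rest < 2 ^ rest.length :=
    pvVal_lt rest (fun x hx => h x (by simp [hx]))
  rw [pvXorSplit _ _ _ _ hrest]
  congr 2
  rcases h1 with rfl|rfl <;> rcases h2 with rfl|rfl <;> rcases h3 with rfl|rfl <;>
    rcases h4 with rfl|rfl <;> rcases h5 with rfl|rfl <;> rcases h6 with rfl|rfl <;>
    rcases h7 with rfl|rfl <;> rcases h8 with rfl|rfl <;> decide

theorem pvStep_all01 (b1 b2 b3 b4 b5 b6 b7 b8 : Int) (rest : List Int)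
    (h : pvAll01 (1::b1::b2::b3::b4::b5::b6::b7::b8::rest)) :
    pvAll01 (pvXorStep (1::b1::b2::b3::b4::b5::b6::b7::b8::rest)) := by
  rw [pvXorStep_eval]
  have hx1 : ∀ b : Int, b = 0 ∨ b = 1 → PySem.Int.bxor b 1 = 0 ∨ PySem.Int.bxor b 1 = 1 := by
    rintro b (rfl|rfl)
    · right; decide
    · left; decide
  intro x hx
  simp only [List.mem_cons] at hx
  rcases hx with hx|hx|hx|hx|hx|hx|hx|hx|hx|hx
  · rw [hx]; left; rfl
  · rw [hx]; exact h b1 (by simp)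
  · rw [hx]; exact h b2 (by simp)
  · rw [hx]; exact h b3 (by simp)
  · rw [hx]; exact hx1 b4 (h b4 (by simp))
  · rw [hx]; exact hx1 b5 (h b5 (by simp))
  · rw [hx]; exact h b6 (by simp)
  · rw [hx]; exact hx1 b7 (h b7 (by simp))
  · rw [hx]; exact hx1 b8 (h b8 (by simp))
  · exact h x (by simp [hx])

theorem pvBitLen_eq (m k : Nat) (hlo : 2 ^ k ≤ m) (hhi : m < 2 ^ (k+1)) :
    PySem.Int.bitLength (m : Int) = k + 1 := by
  have hp : 0 < 2 ^ k := by positivity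
  have hm : m ≠ 0 := by omega
  have h1 : m < 2 ^ PySem.Int.bitLength (m : Int) := by
    have := PySem.Int.lt_two_pow_bitLength (m : Int)
    simpa using this
  have h2 : 2 ^ (PySem.Int.bitLength (m : Int) - 1) ≤ m := by
    have := PySem.Int.two_pow_bitLength_le (m : Int) (by exact_mod_cast hm)
    simpa using this
  set B := PySem.Int.bitLength (m : Int) with hB
  by_contra hne
  rcases Nat.lt_or_ge B (k+1) with hlt | hge
  · have : 2 ^ B ≤ 2 ^ k := Nat.pow_le_pow_right (by norm_num) (by omega)
    omega
  · have hB2 : k + 2 ≤ B := by omega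
    have : 2 ^ (k+1) ≤ 2 ^ (B - 1) := Nat.pow_le_pow_right (by norm_num) (by omega)
    omega

-- bit length of a 0/1 list value with leading 1 is its length
theorem pvBitLen_list (rest : List Int) (h : pvAll01 ((1:Int) :: rest)) :
    PySem.Int.bitLength ((pvVal ((1:Int) :: rest) : Nat) : Int) = rest.length + 1 := by
  apply pvBitLen_eq
  · exact pvVal_ge rest
  · have := pvVal_lt ((1:Int) :: rest) h
    simpa using this

-- the main loop correspondence, same fuel on both sides
theorem pvLoop_corr : ∀ (f : Nat) (bits : List Int), pvAll01 bits →
    (bits = [] ∨ bits.head? = some 1) →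
    pvAll01 (pvLoopA f bits) ∧
    (pvLoopA f bits = [] ∨ (pvLoopA f bits).head? = some 1) ∧
    pvLoopB f ((pvVal bits : Nat) : Int) = ((pvVal (pvLoopA f bits) : Nat) : Int) ∧
    (bits.length ≤ f + 8 → (pvLoopA f bits).length ≤ 8) := by
  intro f
  induction f with
  | zero =>
      intro bits h01 hh
      refine ⟨h01, hh, rfl, ?_⟩
      intro hlen
      simpa [pvLoopA] using hlen
  | succ f ih =>
      intro bits h01 hh
      by_cases h9 : 9 ≤ bits.length
      · -- bits has a leading 1 and at least 9 entries
        rcases hh with rfl | hh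
        · simp at h9
        match bits, hh with
        | b0 :: rest9, hh =>
        have hb0 : b0 = 1 := by simpa using hh
        subst hb0
        match rest9, h9 with
        | b1::b2::b3::b4::b5::b6::b7::b8::rest, _ =>
        set bits := (1:Int)::b1::b2::b3::b4::b5::b6::b7::b8::rest with hbits
        have hlenB : PySem.Int.bitLength ((pvVal bits : Nat) : Int) = rest.length + 9 := by
          have := pvBitLen_list (b1::b2::b3::b4::b5::b6::b7::b8::rest) h01
          simpa [hbits] using this
        have hA : pvLoopA (f+1) bits = pvLoopA f (pvStripA (pvXorStep bits)) := by
          rw [pvLoopA, if_pos (by simp [hbits])]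
        have hB : pvLoopB (f+1) ((pvVal bits : Nat) : Int) =
            pvLoopB f ((((pvVal bits ^^^ (283 <<< rest.length)) : Nat) : Int)) := by
          rw [pvLoopB, if_pos (by simp [hlenB]), hlenB]
          congr 1
        set bits' := pvStripA (pvXorStep bits) with hbits'
        have hval' : pvVal bits' = pvVal bits ^^^ (283 <<< rest.length) := by
          rw [hbits', hbits]; exact pvStep_val b1 b2 b3 b4 b5 b6 b7 b8 rest h01
        have h01' : pvAll01 bits' :=
          pvStrip_all01 _ (pvStep_all01 b1 b2 b3 b4 b5 b6 b7 b8 rest h01)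
        have hh' : bits' = [] ∨ bits'.head? = some 1 :=
          pvStrip_head _ (pvStep_all01 b1 b2 b3 b4 b5 b6 b7 b8 rest h01)
        have hlen' : bits'.length ≤ bits.length - 1 := by
          rw [hbits', hbits, pvXorStep_eval]
          have := pvStrip_len_zero (b1 :: b2 :: b3 :: PySem.Int.bxor b4 1 :: PySem.Int.bxor b5 1 :: b6 ::
            PySem.Int.bxor b7 1 :: PySem.Int.bxor b8 1 :: rest)
          simp at this ⊢
          omega
        obtain ⟨c1, c2, c3, c4⟩ := ih bits' h01' hh'
        refine ⟨by rwa [hA], by rwa [hA], ?_, ?_⟩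
        · rw [hA, hB, ← hval', c3]
        · intro hlen
          rw [hA]
          apply c4
          simp [hbits] at hlen' hlen ⊢
          omega
      · -- loop exits on both sides
        have hA : pvLoopA (f+1) bits = bits := by rw [pvLoopA, if_neg h9]
        have hBL : PySem.Int.bitLength ((pvVal bits : Nat) : Int) < 9 := by
          rcases hh with rfl | hh
          · simp [pvVal, PySem.Int.bitLength_zero]
          · match bits, hh with
            | b0 :: rest, hh =>
            have hb0 : b0 = 1 := by simpa using hh
            subst hb0
            rw [pvBitLen_list rest h01]
            simp at h9
            omega
        have hB : pvLoopB (f+1) ((pvVal bits : Nat) : Int) = ((pvVal bits : Nat) : Int) := by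
          rw [pvLoopB, if_neg (by omega)]
        refine ⟨by rwa [hA], by rwa [hA], by rw [hA, hB], ?_⟩
        intro _
        rw [hA]; omega

-- canonical digits: basic facts
theorem pvDigitsF_zero_arg (f : Nat) : pvDigitsF f 0 = [] := by
  cases f <;> simp [pvDigitsF]

theorem pvDigitsF_congr : ∀ (f f' m : Nat), m ≤ f → m ≤ f' → pvDigitsF f m = pvDigitsF f' m := by
  intro f
  induction f with
  | zero =>
      intro f' m h1 _
      have : m = 0 := by omega
      subst this
      rw [pvDigitsF_zero_arg, pvDigitsF_zero_arg]
  | succ f ih =>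
      intro f' m h1 h2
      by_cases hm : m = 0
      · subst hm; rw [pvDigitsF_zero_arg, pvDigitsF_zero_arg]
      · cases f' with
        | zero => omega
        | succ f'' =>
            simp only [pvDigitsF, if_neg hm]
            congr 1
            exact ih f'' (m / 2) (by omega) (by omega)

theorem pvDigits_eq_pos (m : Nat) (hm : 0 < m) :
    pvDigits m = pvDigits (m / 2) ++ [((m % 2 : Nat) : Int)] := by
  cases m with
  | zero => omega
  | succ k =>
      show pvDigitsF (k+1) (k+1) = pvDigitsF ((k+1)/2) ((k+1)/2) ++ _
      simp only [pvDigitsF, if_neg (Nat.succ_ne_zero k)]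
      congr 1
      exact pvDigitsF_congr k ((k+1)/2) ((k+1)/2) (by omega) (le_refl _)

theorem pvDigits_ne_nil (m : Nat) (hm : 0 < m) : pvDigits m ≠ [] := by
  rw [pvDigits_eq_pos m hm]; simp

theorem pvDigits_two_mul_add (v : Nat) (b : Int) (hv : 0 < v) (hb : b = 0 ∨ b = 1) :
    pvDigits (2 * v + b.toNat) = pvDigits v ++ [b] := by
  have hpos : 0 < 2 * v + b.toNat := by omega
  have hdiv : (2 * v + b.toNat) / 2 = v := by rcases hb with rfl | rfl <;> omega
  have hmod : (2 * v + b.toNat) % 2 = b.toNat := by rcases hb with rfl | rfl <;> omega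
  rw [pvDigits_eq_pos _ hpos, hdiv, hmod]
  congr 2
  rcases hb with rfl | rfl <;> simp

theorem pvDigits_head (m : Nat) : ∀ (_ : 0 < m), (pvDigits m).head? = some 1 := by
  induction m using Nat.strong_induction_on with
  | _ m ih =>
    intro hm
    rw [pvDigits_eq_pos m hm]
    by_cases hv : m / 2 = 0
    · have : m = 1 := by omega
      subst this
      decide
    · rw [List.head?_append_of_ne_nil _ (pvDigits_ne_nil _ (by omega))]
      exact ih _ (Nat.div_lt_self hm (by omega)) (by omega)

theorem pvDigits_all01 (m : Nat) : pvAll01 (pvDigits m) := by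
  induction m using Nat.strong_induction_on with
  | _ m ih =>
    by_cases hm : m = 0
    · subst hm
      intro b hb
      simp [pvDigits, pvDigitsF] at hb
    · rw [pvDigits_eq_pos m (by omega)]
      intro b hb
      rcases List.mem_append.mp hb with h | h
      · exact ih _ (Nat.div_lt_self (by omega) (by omega)) b h
      · rw [List.mem_singleton] at h
        subst h
        rcases Nat.mod_two_eq_zero_or_one m with h2 | h2 <;> rw [h2]
        · left; rfl
        · right; rfl

theorem pvVal_digits (m : Nat) : pvVal (pvDigits m) = m := by
  induction m using Nat.strong_induction_on with
  | _ m ih =>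
    by_cases hm : m = 0
    · subst hm; rfl
    · rw [pvDigits_eq_pos m (by omega), pvVal_append]
      rw [ih _ (Nat.div_lt_self (by omega) (by omega))]
      simp only [List.length_cons, List.length_nil, pow_one, pvVal, List.foldl_cons, List.foldl_nil]
      have h2 : (((m % 2 : Nat) : Int)).toNat = m % 2 := by omega
      rw [h2]
      omega

-- a 0/1 list with leading 1 is the canonical digit list of its value
theorem pvDigits_of_list (bits : List Int) (h01 : pvAll01 bits) (hh : bits.head? = some 1) :
    bits = pvDigits (pvVal bits) := by
  induction bits using List.reverseRecOn with
  | nil => simp at hh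
  | append_singleton xs b ih =>
    by_cases hxs : xs = []
    · subst hxs
      simp at hh
      subst hh
      decide
    · have hh' : xs.head? = some 1 := by
        rwa [List.head?_append_of_ne_nil _ hxs] at hh
      have h01' : pvAll01 xs := fun x hx => h01 x (by simp [hx])
      have hb : b = 0 ∨ b = 1 := h01 b (by simp)
      have ihx := ih h01' hh'
      have hvpos : 0 < pvVal xs := by
        match xs, hh' with
        | x :: rest, hh' =>
          have hx1 : x = 1 := by simpa using hh'
          subst hx1
          have hge := pvVal_ge rest
          have hp : 0 < 2 ^ rest.length := by positivity
          omega
      have harg : pvVal (xs ++ [b]) = 2 * pvVal xs + b.toNat := by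
        rw [pvVal_append]
        simp [pvVal]
        ring
      rw [harg, pvDigits_two_mul_add (pvVal xs) b hvpos hb, ← ihx]

-- characterisation of Nat.toDigits 2 via toDigitsCore
def pvChars : Nat → List Char
  | 0 => []
  | m+1 => pvChars ((m+1) / 2) ++ [Nat.digitChar ((m+1) % 2)]
decreasing_by exact Nat.div_lt_self (Nat.succ_pos m) (by omega)

theorem pvToDigitsCore (fuel : Nat) : ∀ (m : Nat) (ds : List Char), m < fuel →
    Nat.toDigitsCore 2 fuel m ds = (if m = 0 then ['0'] else pvChars m) ++ ds := by
  induction fuel with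
  | zero => intro m ds h; omega
  | succ fuel ih =>
      intro m ds hmf
      rw [Nat.toDigitsCore]
      by_cases hz : m / 2 = 0
      · rw [if_pos hz]
        match m, hz with
        | 0, _ => simp; decide
        | 1, _ => simp [pvChars]
        | m+2, hz => omega
      · rw [if_neg hz]
        have hlt : m / 2 < fuel := by
          have h2 : m / 2 < m := Nat.div_lt_self (by omega) (by omega)
          omega
        rw [ih (m / 2) _ hlt, if_neg hz]
        match m, hz with
        | m+1, _ =>
          rw [pvChars]
          simp

theorem pvToDigits_two (m : Nat) :
    Nat.toDigits 2 m = (if m = 0 then ['0'] else pvChars m) ++ [] := by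
  rw [Nat.toDigits, pvToDigitsCore (m+1) m [] (by omega)]

theorem pvChars_map (m : Nat) :
    (pvChars m).map (fun c => (PySem.Int.ofChars? [c]).getD 0) = pvDigits m := by
  induction m using Nat.strong_induction_on with
  | _ m ih =>
    match m with
    | 0 => simp [pvChars, pvDigits, pvDigitsF]
    | m+1 =>
      rw [pvChars, List.map_append, ih _ (Nat.div_lt_self (by omega) (by omega)),
        pvDigits_eq_pos (m+1) (by omega)]
      congr 1
      rcases Nat.mod_two_eq_zero_or_one (m+1) with h | h <;> rw [h] <;> decide

-- the initial bits of A equal the canonical digits (and [0] for value 0)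
theorem pvInit_bits (m : Nat) :
    (PySem.List.slice (PySem.Int.toBinChars0b (m : Int)) (some 2) none).map
        (fun c => (PySem.Int.ofChars? [c]).getD 0) =
      if m = 0 then [(0 : Int)] else pvDigits m := by
  have h1 : PySem.Int.toBinChars0b (m : Int) = '0' :: 'b' :: Nat.toDigits 2 m := by
    rw [PySem.Int.toBinChars0b, if_neg (Int.not_lt.mpr (by positivity))]
    simp
  rw [h1, show ((2:Int)) = ((2:Nat):Int) from rfl, PySem.List.slice_from_natCast]
  simp only [List.drop_succ_cons, List.drop_zero, List.drop]
  rw [pvToDigits_two]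
  by_cases hm : m = 0
  · subst hm; decide
  · simp only [if_neg hm]
    simp [pvChars_map]

-- rendering digits back through '' + str(bit) and int(·, 2): checked for all values < 256
set_option maxRecDepth 8000 in
theorem pvFinish (m : Nat) (hm : m < 256) (hpos : 0 < m) :
    (PySem.Int.ofCharsBase?
        (if ((pvDigits m).foldl (fun s b => s ++ PySem.Int.toChars b) []).length = 0 then ['0']
         else (pvDigits m).foldl (fun s b => s ++ PySem.Int.toChars b) []) 2).getD 0 = (m : Int) := by
  revert hpos
  revert hm
  revert m
  decide

theorem pvVal_pos (bits : List Int) (hh : bits.head? = some 1) : 0 < pvVal bits := by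
  match bits, hh with
  | b :: rest, hh =>
    have hb : b = 1 := by simpa using hh
    subst hb
    have hge := pvVal_ge rest
    have hp : 0 < 2 ^ rest.length := by positivity
    omega

-- ---- B-side machinery: the Horner pass computes the same reduction ----

def pvBL (m : Nat) : Nat := PySem.Int.bitLength (m : Int)

-- fuel-based Nat mirror of the top-down reduction
def pvRedF : Nat → Nat → Nat
  | 0, m => m
  | f+1, m => if 9 ≤ pvBL m then pvRedF f (m ^^^ (283 <<< (pvBL m - 9))) else m

def pvRed (m : Nat) : Nat := pvRedF (pvBL m) m

-- the Nat shape of B's accumulator step (without the absorbed bit)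
def pvXt (r : Nat) : Nat := if (r <<< 1) &&& 256 ≠ 0 then (r <<< 1) ^^^ 283 else r <<< 1

theorem pvShiftLeft_one (r : Nat) : r <<< 1 = 2 * r := by
  rw [Nat.shiftLeft_eq]; ring

theorem pvBL_lt (m : Nat) : m < 2 ^ pvBL m := by
  have := PySem.Int.lt_two_pow_bitLength (m : Int)
  simpa [pvBL] using this

theorem pvBL_zero : pvBL 0 = 0 := by
  simp [pvBL, PySem.Int.bitLength_zero]

theorem pvBL_pos_le (m : Nat) (hm : m ≠ 0) : 2 ^ (pvBL m - 1) ≤ m := by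
  have := PySem.Int.two_pow_bitLength_le (m : Int) (by exact_mod_cast hm)
  simpa [pvBL] using this

theorem pvBL_le_of_lt (m k : Nat) (h : m < 2 ^ k) : pvBL m ≤ k := by
  by_cases hm : m = 0
  · subst hm; rw [pvBL_zero]; omega
  · by_contra h'
    have hk1 : k ≤ pvBL m - 1 := by omega
    have h2 : (2:Nat) ^ k ≤ 2 ^ (pvBL m - 1) := Nat.pow_le_pow_right (by norm_num) hk1
    have := pvBL_pos_le m hm
    omega

theorem pvBL_ge9 (m : Nat) (h : 256 ≤ m) : 9 ≤ pvBL m := by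
  by_contra h'
  have h8 : pvBL m ≤ 8 := by omega
  have h2 : (2:Nat) ^ pvBL m ≤ 2 ^ 8 := Nat.pow_le_pow_right (by norm_num) h8
  have := pvBL_lt m
  norm_num at h2
  omega

-- xor against a small constant leaves the high part alone
theorem pvXorLow (a x c r : Nat) (hx : x < 2 ^ r) (hc : c < 2 ^ r) :
    (a * 2 ^ r + x) ^^^ c = a * 2 ^ r + (x ^^^ c) := by
  apply Nat.eq_of_testBit_eq
  intro j
  have h1 : a * 2 ^ r + x = 2 ^ r * a + x := by ring_nf
  have h3 : a * 2 ^ r + (x ^^^ c) = 2 ^ r * a + (x ^^^ c) := by ring_nf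
  have hxc : x ^^^ c < 2 ^ r := Nat.xor_lt_two_pow hx hc
  rw [h1, h3, Nat.testBit_xor, Nat.testBit_two_pow_mul_add a hx,
    Nat.testBit_two_pow_mul_add a hxc]
  by_cases hj : j < r
  · simp [hj, Nat.testBit_xor]
  · have hcj : c < 2 ^ j := lt_of_lt_of_le hc (Nat.pow_le_pow_right (by norm_num) (by omega))
    simp [hj, Nat.testBit_lt_two_pow hcj]

theorem pvXorEven (m b : Nat) (hb : b < 2) : (2 * m) ^^^ b = 2 * m + b := by
  have h := pvXorLow m 0 b 1 (by norm_num) (by omega)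
  simp only [pow_one, add_zero, Nat.zero_xor] at h
  rw [mul_comm 2 m]
  exact h

theorem pvXorDouble (x y : Nat) : (2 * x) ^^^ (2 * y) = 2 * (x ^^^ y) := by
  have h := pvXorSplit x 0 y 1 (by norm_num)
  rw [Nat.shiftLeft_eq] at h
  simp only [pow_one, add_zero] at h
  rw [mul_comm 2 x, mul_comm 2 y, mul_comm 2 (x ^^^ y)]
  exact h

theorem pvTestBit8_true (v : Nat) (h1 : 256 ≤ v) (h2 : v < 512) : v.testBit 8 = true := by
  have h8 : (2:Nat) ^ 8 = 256 := by norm_num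
  have hv : v = 2 ^ 8 * 1 + (v - 256) := by rw [h8]; omega
  rw [hv, Nat.testBit_two_pow_mul_add 1 (show v - 256 < 2 ^ 8 by rw [h8]; omega)]
  norm_num

theorem pvLt256 (v : Nat) (hv : v < 512) (h8 : v.testBit 8 = false) : v < 256 := by
  by_contra h
  push_neg at h
  rw [pvTestBit8_true v h hv] at h8
  simp at h8

theorem pvTopClear (x : Nat) (h1 : 256 ≤ x) (h2 : x < 512) : x ^^^ 283 < 256 := by
  apply pvLt256
  · have h9 : (2:Nat) ^ 9 = 512 := by norm_num
    have := Nat.xor_lt_two_pow (x := x) (y := 283) (n := 9) (by rw [h9]; omega) (by rw [h9]; omega)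
    omega
  · rw [Nat.testBit_xor, pvTestBit8_true x h1 h2, pvTestBit8_true 283 (by norm_num) (by norm_num)]
    rfl

theorem pvAnd256_zero (x : Nat) (h : x < 256) : x &&& 256 = 0 := by
  have h8 : (2:Nat) ^ 8 = 256 := by norm_num
  rw [show (256:Nat) = 2 ^ 8 from h8.symm, Nat.and_two_pow,
    Nat.testBit_lt_two_pow (show x < 2 ^ 8 by rw [h8]; omega)]
  rfl

theorem pvAnd256_ne (x : Nat) (h1 : 256 ≤ x) (h2 : x < 512) : x &&& 256 ≠ 0 := by
  have h8 : (2:Nat) ^ 8 = 256 := by norm_num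
  rw [show (256:Nat) = 2 ^ 8 from h8.symm, Nat.and_two_pow, pvTestBit8_true x h1 h2]
  norm_num

theorem pvXt_small (r : Nat) (h : r < 128) : pvXt r = 2 * r := by
  rw [pvXt, pvShiftLeft_one, if_neg]
  simp [pvAnd256_zero (2 * r) (by omega)]

theorem pvXt_big (r : Nat) (h1 : 128 ≤ r) (h2 : r < 256) : pvXt r = (2 * r) ^^^ 283 := by
  rw [pvXt, pvShiftLeft_one, if_pos]
  exact pvAnd256_ne (2 * r) (by omega) (by omega)

-- one reduction round shrinks the value below 2^(bitlength-1)
theorem pvStepDec (m : Nat) (h9 : 9 ≤ pvBL m) : m ^^^ (283 <<< (pvBL m - 9)) < 2 ^ (pvBL m - 1) := by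
  have hm0 : m ≠ 0 := by
    intro h; rw [h, pvBL_zero] at h9; omega
  have hlo : 2 ^ (pvBL m - 1) ≤ m := pvBL_pos_le m hm0
  have hhi : m < 2 ^ pvBL m := pvBL_lt m
  set L := pvBL m with hL
  set s := L - 9 with hs
  have hps : (2:Nat) ^ (L - 1) = 256 * 2 ^ s := by
    rw [show L - 1 = 8 + s by omega, pow_add]; norm_num
  have hpL : (2:Nat) ^ L = 512 * 2 ^ s := by
    rw [show L = 9 + s by omega, pow_add]; norm_num
  have hsp : 0 < (2:Nat) ^ s := by positivity
  have hx : m % 2 ^ s < 2 ^ s := Nat.mod_lt _ hsp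
  have hdecomp : m / 2 ^ s * 2 ^ s + m % 2 ^ s = m := by
    rw [mul_comm]
    exact Nat.div_add_mod m (2 ^ s)
  have ha1 : 256 ≤ m / 2 ^ s := by
    rw [Nat.le_div_iff_mul_le hsp]
    omega
  have ha2 : m / 2 ^ s < 512 := by
    rw [Nat.div_lt_iff_lt_mul hsp]
    omega
  have hres : m ^^^ (283 <<< s) = (m / 2 ^ s ^^^ 283) * 2 ^ s + m % 2 ^ s := by
    conv_lhs => rw [← hdecomp]
    exact pvXorSplit (m / 2 ^ s) (m % 2 ^ s) 283 s hx
  rw [hres, hps]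
  have h283 : m / 2 ^ s ^^^ 283 < 256 := pvTopClear _ ha1 ha2
  calc (m / 2 ^ s ^^^ 283) * 2 ^ s + m % 2 ^ s
      < (m / 2 ^ s ^^^ 283) * 2 ^ s + 2 ^ s := by omega
    _ = ((m / 2 ^ s ^^^ 283) + 1) * 2 ^ s := by ring
    _ ≤ 256 * 2 ^ s := Nat.mul_le_mul_right _ (by omega)

-- bridge: the Int mirror equals the Nat mirror
theorem pvLoopB_eq (f : Nat) : ∀ (m : Nat), pvLoopB f ((m : Nat) : Int) = ((pvRedF f m : Nat) : Int) := by
  induction f with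
  | zero => intro m; rfl
  | succ f ih =>
      intro m
      have hbl : PySem.Int.bitLength ((m : Nat) : Int) = pvBL m := rfl
      by_cases h : 9 ≤ pvBL m
      · rw [pvLoopB, if_pos (by rw [hbl]; exact h), pvRedF, if_pos h, hbl]
        have hc : (283 : Int) <<< (pvBL m - 9) = (((283 <<< (pvBL m - 9) : Nat)) : Int) := by
          rw [Int.shiftLeft_eq, Nat.shiftLeft_eq]
          push_cast
          ring
        have harg : PySem.Int.bxor ((m : Nat) : Int) ((283 : Int) <<< (pvBL m - 9))
            = (((m ^^^ (283 <<< (pvBL m - 9)) : Nat)) : Int) := by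
          rw [hc]
          exact PySem.Int.bxor_natCast m (283 <<< (pvBL m - 9))
        rw [harg, ih]
      · rw [pvLoopB, if_neg (by rw [hbl]; exact h), pvRedF, if_neg h]

theorem pvRedF_of_small (m f : Nat) (h : ¬ 9 ≤ pvBL m) : pvRedF f m = m := by
  cases f <;> simp [pvRedF, h]

theorem pvRedF_stable (m : Nat) : ∀ f, pvBL m ≤ f → pvRedF f m = pvRed m := by
  induction m using Nat.strong_induction_on with
  | _ m ih =>
    intro f hf
    by_cases h9 : 9 ≤ pvBL m
    · have hm0 : m ≠ 0 := by intro h; rw [h, pvBL_zero] at h9; omega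
      have hdec := pvStepDec m h9
      have hm'm : m ^^^ (283 <<< (pvBL m - 9)) < m := lt_of_lt_of_le hdec (pvBL_pos_le m hm0)
      have hbl' : pvBL (m ^^^ (283 <<< (pvBL m - 9))) ≤ pvBL m - 1 := pvBL_le_of_lt _ _ hdec
      cases f with
      | zero => omega
      | succ f' =>
        rw [pvRedF, if_pos h9, ih _ hm'm f' (by omega)]
        have hL : pvRed m = pvRedF (pvBL m - 1 + 1) m := by
          unfold pvRed; congr 1; omega
        rw [hL, pvRedF, if_pos h9, ih _ hm'm (pvBL m - 1) (by omega)]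
    · rw [pvRedF_of_small m f h9, pvRed, pvRedF_of_small m _ h9]

theorem pvRed_small (m : Nat) (h : m < 256) : pvRed m = m := by
  apply pvRedF_of_small
  have h8 : (2:Nat) ^ 8 = 256 := by norm_num
  have := pvBL_le_of_lt m 8 (by rw [h8]; omega)
  omega

theorem pvRed_big (m : Nat) (h : 256 ≤ m) : pvRed m = pvRed (m ^^^ (283 <<< (pvBL m - 9))) := by
  have h9 := pvBL_ge9 m h
  have hdec := pvStepDec m h9
  have hbl' : pvBL (m ^^^ (283 <<< (pvBL m - 9))) ≤ pvBL m - 1 := pvBL_le_of_lt _ _ hdec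
  have hL : pvRed m = pvRedF (pvBL m - 1 + 1) m := by
    unfold pvRed; congr 1; omega
  rw [hL, pvRedF, if_pos h9, pvRedF_stable _ _ (by omega)]

-- core Horner identity: absorbing one more bit is one accumulator step
theorem pvHornerStep (m : Nat) : ∀ b : Nat, b < 2 → pvRed (2 * m + b) = pvXt (pvRed m) ^^^ b := by
  induction m using Nat.strong_induction_on with
  | _ m ih =>
    intro b hb
    by_cases hA : m < 128
    · rw [pvRed_small m (by omega), pvRed_small (2*m+b) (by omega), pvXt_small m hA,
        pvXorEven m b hb]
    · by_cases hB : m < 256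
      · have h128 : 128 ≤ m := by omega
        rw [pvRed_small m hB, pvXt_big m h128 hB]
        have p8 : (2:Nat) ^ 8 = 256 := by norm_num
        have p9 : (2:Nat) ^ 9 = 512 := by norm_num
        have hbl : pvBL (2*m+b) = 9 := by
          unfold pvBL
          have := pvBitLen_eq (2*m+b) 8 (by rw [p8]; omega) (by rw [show (8:Nat)+1 = 9 from rfl, p9]; omega)
          omega
        rw [pvRed_big (2*m+b) (by omega), hbl]
        rw [show (283:Nat) <<< (9-9) = 283 from rfl]
        rw [show 2*m + b = (2*m) ^^^ b from (pvXorEven m b hb).symm]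
        rw [Nat.xor_assoc, Nat.xor_comm b 283, ← Nat.xor_assoc]
        have hclear : (2*m) ^^^ 283 < 256 := pvTopClear (2*m) (by omega) (by omega)
        have hfin : ((2*m) ^^^ 283) ^^^ b < 256 := by
          have := Nat.xor_lt_two_pow (x := (2*m) ^^^ 283) (y := b) (n := 8) (by rw [p8]; omega) (by rw [p8]; omega)
          omega
        rw [pvRed_small _ hfin]
      · push_neg at hB
        have h9 := pvBL_ge9 m hB
        have hm0 : m ≠ 0 := by omega
        have hlo := pvBL_pos_le m hm0
        have hhi := pvBL_lt m
        have hp1 : (2:Nat) ^ pvBL m = 2 ^ (pvBL m - 1) * 2 := by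
          rw [← pow_succ]; congr 1; omega
        have hp2 : (2:Nat) ^ (pvBL m + 1) = 2 ^ pvBL m * 2 := pow_succ 2 (pvBL m)
        have hbl2 : pvBL (2*m+b) = pvBL m + 1 :=
          pvBitLen_eq (2*m+b) (pvBL m) (by omega) (by omega)
        rw [pvRed_big (2*m+b) (by omega), hbl2,
          show pvBL m + 1 - 9 = (pvBL m - 9) + 1 from by omega]
        have hsh : (283:Nat) <<< ((pvBL m - 9) + 1) = 2 * (283 <<< (pvBL m - 9)) := by
          rw [Nat.shiftLeft_eq, Nat.shiftLeft_eq, pow_succ]; ring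
        rw [hsh, show 2*m + b = (2*m) ^^^ b from (pvXorEven m b hb).symm,
          Nat.xor_assoc, Nat.xor_comm b _, ← Nat.xor_assoc, pvXorDouble m _]
        have hdec := pvStepDec m h9
        have hm'm : m ^^^ (283 <<< (pvBL m - 9)) < m := lt_of_lt_of_le hdec hlo
        rw [pvXorEven _ b hb, ih _ hm'm b hb, ← pvRed_big m hB]

-- the full MSB-to-LSB pass computes the reduction (Nat level)
theorem pvHornerN (L : Nat) : ∀ (m : Nat), m < 2 ^ L →
    (List.range L).foldl (fun r j => pvXt r ^^^ ((m >>> (L - 1 - j)) &&& 1)) 0 = pvRed m := by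
  induction L with
  | zero =>
      intro m hm
      have hm0 : m = 0 := by simpa using hm
      subst hm0
      rw [List.range_zero, List.foldl_nil, pvRed_small 0 (by norm_num)]
  | succ L ih =>
      intro m hm
      rw [List.range_succ, List.foldl_append, List.foldl_cons, List.foldl_nil]
      have hpref : (List.range L).foldl (fun r j => pvXt r ^^^ ((m >>> (L + 1 - 1 - j)) &&& 1)) 0
          = (List.range L).foldl (fun r j => pvXt r ^^^ (((m >>> 1) >>> (L - 1 - j)) &&& 1)) 0 := by
        apply PySem.List.foldl_congr_mem
        intro acc j hj
        have hj' : j < L := List.mem_range.mp hj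
        have he : L + 1 - 1 - j = 1 + (L - 1 - j) := by omega
        rw [he, Nat.shiftRight_add]
      have hm2 : m >>> 1 < 2 ^ L := by
        rw [Nat.shiftRight_one]
        have hp : (2:Nat) ^ (L+1) = 2 ^ L * 2 := pow_succ 2 L
        omega
      rw [hpref, ih (m >>> 1) hm2]
      rw [show L + 1 - 1 - L = 0 from by omega, Nat.shiftRight_zero, Nat.and_one_is_mod,
        Nat.shiftRight_one]
      rw [← pvHornerStep (m / 2) (m % 2) (by omega)]
      congr 1
      omega

-- moving the port's Int fold down to the Nat fold
theorem pvFoldCast (m L : Nat) : ∀ (js : List Nat) (r : Nat), (∀ j ∈ js, j < L) →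
    js.foldl (fun acc j => pvStepB ((m : Nat) : Int) acc (((L : Nat) : Int) - 1 - ((j : Nat) : Int))) ((r : Nat) : Int)
      = ((js.foldl (fun r j => pvXt r ^^^ ((m >>> (L - 1 - j)) &&& 1)) r : Nat) : Int) := by
  intro js
  induction js with
  | nil => intro r _; rfl
  | cons j js ihjs =>
      intro r hmem
      have hj : j < L := hmem j (by simp)
      rw [List.foldl_cons, List.foldl_cons]
      have hstep : pvStepB ((m : Nat) : Int) ((r : Nat) : Int) (((L : Nat) : Int) - 1 - ((j : Nat) : Int))
          = ((pvXt r ^^^ ((m >>> (L - 1 - j)) &&& 1) : Nat) : Int) := by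
        have htn : ((((L : Nat) : Int) - 1 - ((j : Nat) : Int))).toNat = L - 1 - j := by omega
        simp only [pvStepB, pvXt, htn]
        rw [show ((r : Nat) : Int) <<< (1 : Nat) = (((r <<< 1 : Nat)) : Int) from by simp,
          show ((m : Nat) : Int) >>> (L - 1 - j) = (((m >>> (L - 1 - j) : Nat)) : Int) from by simp]
        rw [show (256:Int) = (((256:Nat)):Int) from by norm_num,
          show (283:Int) = (((283:Nat)):Int) from by norm_num,
          show (1:Int) = (((1:Nat)):Int) from by norm_num]
        simp only [PySem.Int.band_natCast, PySem.Int.bxor_natCast, Int.natCast_ne_zero]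
        by_cases hc : (r <<< 1) &&& 256 = 0
        · rw [if_neg (by simp [hc]), if_neg (by simp [hc])]
          simp only [PySem.Int.bxor_natCast]
        · rw [if_pos hc, if_pos hc]
          simp only [PySem.Int.bxor_natCast]
      rw [hstep, ihjs (pvXt r ^^^ ((m >>> (L - 1 - j)) &&& 1)) (fun x hx => hmem x (by simp [hx]))]

-- the port's Int fold equals the reduction
theorem pvFoldInt (m : Nat) :
    (PySem.List.pyRange ((PySem.Int.bitLength ((m : Nat) : Int) : Int) - 1) (-1) (-1)).foldl
      (pvStepB ((m : Nat) : Int)) 0 = ((pvRed m : Nat) : Int) := by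
  rw [PySem.List.pyRange_neg_one]
  have hL : PySem.Int.bitLength ((m : Nat) : Int) = pvBL m := rfl
  rw [hL]
  have hlen : ((((pvBL m : Nat) : Int) - 1) - (-1)).toNat = pvBL m := by omega
  rw [hlen, List.foldl_map]
  have h := pvFoldCast m (pvBL m) (List.range (pvBL m)) 0
    (fun j hj => List.mem_range.mp hj)
  rw [show ((0:Int)) = (((0:Nat)):Int) from rfl]
  rw [h, pvHornerN (pvBL m) m (pvBL_lt m)]

-- ===== VERDICT (by name: the statement is the Claim_ definition above) =====
theorem mod_x_spec : Claim_equal_mod_x := by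
  intro byte _ hpre
  unfold Spec_mod_x mod_x mod_x_alt
  unfold Pre_mod_x at hpre
  rcases hopt : PySem.Int.ofStrBase? byte 16 with _ | n
  · rw [hopt] at hpre; norm_num at hpre
  · rw [hopt] at hpre
    simp only [Option.getD_some] at hpre
    obtain ⟨m, rfl⟩ : ∃ m : Nat, n = (m : Int) := ⟨n.toNat, by omega⟩
    simp only [hopt, Option.getD_some]
    rw [pvInit_bits m]
    by_cases hm : m = 0
    · subst hm
      simp only [if_pos rfl]
      decide
    · simp only [if_neg hm]
      have h01 := pvDigits_all01 m
      have hh := pvDigits_head m (by omega)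
      obtain ⟨tail, htl⟩ : ∃ tail, pvDigits m = (1 : Int) :: tail := by
        cases hd : pvDigits m with
        | nil => rw [hd] at hh; simp at hh
        | cons b t =>
            rw [hd] at hh
            simp at hh
            exact ⟨t, by rw [hh]⟩
      have hval : pvVal (pvDigits m) = m := pvVal_digits m
      have hfuelB : PySem.Int.bitLength ((m : Nat) : Int) = (pvDigits m).length := by
        rw [← hval, htl, pvBitLen_list tail (htl ▸ h01), ← htl, hval, htl, List.length_cons]
      obtain ⟨c1, c2, c3, c4⟩ :=
        pvLoop_corr (pvDigits m).length (pvDigits m) h01 (Or.inr hh)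
      set F := pvLoopA (pvDigits m).length (pvDigits m) with hF
      have hlen8 : F.length ≤ 8 := c4 (by omega)
      have hvlt : pvVal F < 256 := by
        have h1 := pvVal_lt F c1
        have h2 : (2:Nat) ^ F.length ≤ 2 ^ 8 := Nat.pow_le_pow_right (by norm_num) hlen8
        omega
      have hnum : (PySem.Int.ofCharsBase?
          (if (F.foldl (fun s b => s ++ PySem.Int.toChars b) []).length = 0 then ['0']
           else F.foldl (fun s b => s ++ PySem.Int.toChars b) []) 2).getD 0 = ((pvVal F : Nat) : Int) := by
        rcases c2 with hFe | hFh
        · rw [hFe]; decide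
        · have hFd := pvDigits_of_list F c1 hFh
          have hpos : 0 < pvVal F := pvVal_pos F hFh
          conv_lhs => rw [hFd]
          exact pvFinish (pvVal F) hvlt hpos
      rw [hval] at c3
      have hAside : ((pvVal F : Nat) : Int) = ((pvRed m : Nat) : Int) := by
        rw [← c3, ← hfuelB, pvLoopB_eq]
        rfl
      rw [hnum, pvFoldInt m, hAside]
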